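-- pv_equiv track=rewrite | github.com/mattelothere/funtris | files/assets/shape_generation/circle.py | circle
-- ===== SOURCE A (Python) =====
-- def circle(size):
--     """
--     generates a size*size matrix representing the playable space
--     """
--     # mat = [[5] * size] * size # is an error : copies the memory address
--     mat = [[0] * size for _ in range(size)]
--     corner_size = 3
--
--     for i in range(len(mat)):
--         for j in range(len(mat[0])):
--             if (i+j) <= corner_size or (size-1-j+i) <= corner_size or (size-1-i+j) <= corner_size or (size-1-i+size-1-j) <= corner_size:
--                 mat[i][j] = 0
--             else:
--                 mat[i][j] = 1
--     return mat
-- ===== SOURCE B (Python) =====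
-- def circle(size):
--     """
--     generates a size*size matrix representing the playable space
--     """
--     mat = []
--     for i in range(size):
--         k = max(0, 4 - min(i, size - 1 - i))
--         ones = size - 2 * k
--         if ones > 0:
--             mat.append([0] * k + [1] * ones + [0] * k)
--         else:
--             mat.append([0] * size)
--     return mat
-- ===== Notes on version B (the rewrite author's own statement) =====
-- stated objective: simpler
-- what changed: Instead of scanning every cell and testing a four-way corner predicate, B builds each row directly in closed form as a zero run, a run of ones, and a zero run, with the zero-run width computed from the row's distance to the nearer horizontal edge (whole-zero row when the corner triangles overlap).
import Mathlib
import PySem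

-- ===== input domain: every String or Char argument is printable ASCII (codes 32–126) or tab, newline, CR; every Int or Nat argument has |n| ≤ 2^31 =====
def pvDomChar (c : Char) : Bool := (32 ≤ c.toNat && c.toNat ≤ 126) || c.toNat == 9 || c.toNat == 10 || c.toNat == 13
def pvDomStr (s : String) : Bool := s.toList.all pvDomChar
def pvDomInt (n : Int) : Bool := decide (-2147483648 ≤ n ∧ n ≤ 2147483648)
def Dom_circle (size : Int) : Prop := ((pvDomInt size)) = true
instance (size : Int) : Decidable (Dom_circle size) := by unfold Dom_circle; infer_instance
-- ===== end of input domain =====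

-- B replaces A's per-cell four-way corner predicate scan by a closed-form per-row
-- construction [0]*k ++ [1]*(size-2k) ++ [0]*k (simpler decomposition, same cost).


-- ===== PORT A =====
-- the loops' indices i, j are always in range, so pyGetD … [] / pySetD are exact
-- for Python's mat[0], mat[i] reads and the mat[i][j] writes here.
def circle (size : Int) : List (List Int) :=
  let mat := (PySem.List.pyRange 0 size 1).map (fun _ => PySem.List.pyRepeat [(0:Int)] size)
  (PySem.List.pyRange 0 (mat.length : Int) 1).foldl (fun m i =>
    (PySem.List.pyRange 0 ((PySem.List.pyGetD m 0 []).length : Int) 1).foldl (fun m' j =>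
      PySem.List.pySetD m' i (PySem.List.pySetD (PySem.List.pyGetD m' i []) j
        (if i+j ≤ 3 ∨ size-1-j+i ≤ 3 ∨ size-1-i+j ≤ 3 ∨ size-1-i+size-1-j ≤ 3 then 0 else 1))) m) mat

-- ===== PORT B =====
def circle_alt (size : Int) : List (List Int) :=
  (PySem.List.pyRange 0 size 1).foldl (fun mat i =>
    let k := max 0 (4 - min i (size - 1 - i))
    let ones := size - 2 * k
    mat ++ [if ones > 0 then
        PySem.List.pyRepeat [(0:Int)] k ++ PySem.List.pyRepeat [(1:Int)] ones ++ PySem.List.pyRepeat [(0:Int)] k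
      else PySem.List.pyRepeat [(0:Int)] size]) []

-- ===== PRECONDITION & SPEC =====
def Spec_circle (size : Int) (out : List (List Int)) : Prop := out = circle_alt size
instance (size : Int) (out : List (List Int)) : Decidable (Spec_circle size out) := by unfold Spec_circle; infer_instance

-- ===== CLAIM (what is proved, stated in full; the proofs are below) =====
def Claim_equal_circle : Prop := ∀ (size : Int), Dom_circle size → Spec_circle size (circle size)

-- ===== LEMMAS AND PROOFS =====

-- A's row i, as the map of A's cell predicate over the column indices
def pvRowA (size i : Int) : List Int :=
  (PySem.List.pyRange 0 size 1).map (fun j =>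
    if i+j ≤ 3 ∨ size-1-j+i ≤ 3 ∨ size-1-i+j ≤ 3 ∨ size-1-i+size-1-j ≤ 3 then 0 else 1)

-- B's row i
def pvRowB (size i : Int) : List Int :=
  let k := max 0 (4 - min i (size - 1 - i))
  let ones := size - 2 * k
  if ones > 0 then
      PySem.List.pyRepeat [(0:Int)] k ++ PySem.List.pyRepeat [(1:Int)] ones ++ PySem.List.pyRepeat [(0:Int)] k
    else PySem.List.pyRepeat [(0:Int)] size

-- filling a row left to right with f from position a yields take a ++ map f
lemma pv_rowfold (f : Int → Int) :
    ∀ (n : Nat) (a : Int) (r : List Int), 0 ≤ a → (r.length : Int) - a = n →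
    (PySem.List.pyRange a (r.length : Int) 1).foldl (fun r' j => PySem.List.pySetD r' j (f j)) r
      = r.take a.toNat ++ (PySem.List.pyRange a (r.length : Int) 1).map f := by
  intro n
  induction n with
  | zero =>
    intro a r ha hn
    rw [PySem.List.pyRange_one_eq_nil (by omega)]
    simp
    omega
  | succ n ih =>
    intro a r ha hn
    rw [PySem.List.pyRange_one_cons (by omega)]
    simp only [List.foldl_cons, List.map_cons]
    rw [PySem.List.pySetD_of_nonneg r (f a) ha]
    have hlen : (r.set a.toNat (f a)).length = r.length := by simp
    have key := ih (a+1) (r.set a.toNat (f a)) (by omega) (by rw [hlen]; omega)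
    rw [hlen] at key
    rw [key]
    have h1 : (r.set a.toNat (f a)).take (a+1).toNat = r.take a.toNat ++ [f a] := by
      have h2 : (a+1).toNat = a.toNat + 1 := by omega
      have h3 : a.toNat < r.length := by omega
      rw [h2, List.take_add_one, List.take_set_of_le (le_refl a.toNat)]
      simp [h3]
    rw [h1]
    simp

-- a loop that writes only row i commutes with extracting that row
lemma pv_setrow_fold (js : List Int) :
    ∀ (m : List (List Int)) (i : Int) (f : Int → Int), 0 ≤ i → i < (m.length : Int) →
    js.foldl (fun m' j => PySem.List.pySetD m' i (PySem.List.pySetD (PySem.List.pyGetD m' i []) j (f j))) m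
      = PySem.List.pySetD m i (js.foldl (fun r j => PySem.List.pySetD r j (f j)) (PySem.List.pyGetD m i [])) := by
  induction js with
  | nil =>
    intro m i f hi him
    rw [List.foldl_nil, List.foldl_nil, PySem.List.pySetD_of_nonneg _ _ hi,
        PySem.List.pyGetD_of_nonneg _ _ hi]
    have h3 : i.toNat < m.length := by omega
    rw [List.getD_eq_getElem _ _ h3, List.set_getElem_self]
  | cons j js ih =>
    intro m i f hi him
    simp only [List.foldl_cons]
    set r1 := PySem.List.pySetD (PySem.List.pyGetD m i []) j (f j) with hr1
    have h3 : i.toNat < m.length := by omega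
    have h1 : PySem.List.pyGetD (PySem.List.pySetD m i r1) i [] = r1 := by
      rw [PySem.List.pySetD_of_nonneg _ _ hi, PySem.List.pyGetD_of_nonneg _ _ hi]
      rw [List.getD_eq_getElem _ _ (by simpa using h3), List.getElem_set_self]
    have h2 : i < ((PySem.List.pySetD m i r1).length : Int) := by
      rw [PySem.List.pySetD_of_nonneg _ _ hi]; simpa
    rw [ih _ i f hi h2, h1, PySem.List.pySetD_of_nonneg _ _ hi, PySem.List.pySetD_of_nonneg _ _ hi,
        PySem.List.pySetD_of_nonneg _ _ hi, List.set_set]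

lemma pv_outer (size : Int) (hpos : 0 < size) :
    ∀ (t : Nat), t ≤ size.toNat →
    (PySem.List.pyRange 0 (t : Int) 1).foldl (fun m i =>
      (PySem.List.pyRange 0 ((PySem.List.pyGetD m 0 []).length : Int) 1).foldl (fun m' j =>
        PySem.List.pySetD m' i (PySem.List.pySetD (PySem.List.pyGetD m' i []) j
          (if i+j ≤ 3 ∨ size-1-j+i ≤ 3 ∨ size-1-i+j ≤ 3 ∨ size-1-i+size-1-j ≤ 3 then 0 else 1))) m)
      (List.replicate size.toNat (List.replicate size.toNat (0:Int)))
    = (PySem.List.pyRange 0 (t : Int) 1).map (pvRowA size)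
      ++ List.replicate (size.toNat - t) (List.replicate size.toNat (0:Int)) := by
  intro t
  induction t with
  | zero =>
    intro _
    rw [PySem.List.pyRange_one_eq_nil (by omega)]
    simp
  | succ t ih =>
    intro ht
    have htn : t ≤ size.toNat := by omega
    have hcast : ((t+1 : Nat) : Int) = (t : Int) + 1 := by push_cast; ring
    rw [hcast, PySem.List.pyRange_one_succ_right (by positivity), List.foldl_append, List.map_append,
        ih htn]
    set mt := (PySem.List.pyRange 0 (t : Int) 1).map (pvRowA size)
      ++ List.replicate (size.toNat - t) (List.replicate size.toNat (0:Int)) with hmt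
    have hlenmap : ((PySem.List.pyRange 0 (t : Int) 1).map (pvRowA size)).length = t := by
      simp [PySem.List.length_pyRange_one]
    have hlenmt : mt.length = size.toNat := by
      simp [hmt, PySem.List.length_pyRange_one]; omega
    have hhead : (PySem.List.pyGetD mt 0 []).length = size.toNat := by
      rcases Nat.eq_zero_or_pos t with h0 | hpos'
      · subst h0
        rw [hmt, PySem.List.pyRange_one_eq_nil (by omega)]
        have he : size.toNat - 0 = (size.toNat - 1) + 1 := by omega
        rw [he, List.replicate_succ]
        simp [PySem.List.pyGetD_zero_cons]
      · rw [hmt, PySem.List.pyRange_one_cons (by exact_mod_cast hpos')]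
        simp [PySem.List.pyGetD_zero_cons, pvRowA, PySem.List.length_pyRange_one]
    rw [List.foldl_cons, List.foldl_nil, hhead]
    have hset := pv_setrow_fold (PySem.List.pyRange 0 ((size.toNat : Nat) : Int) 1) mt (t : Int)
      (fun j => if (t:Int)+j ≤ 3 ∨ size-1-j+(t:Int) ≤ 3 ∨ size-1-(t:Int)+j ≤ 3 ∨ size-1-(t:Int)+size-1-j ≤ 3 then 0 else 1)
      (by positivity) (by rw [hlenmt]; exact_mod_cast ht)
    rw [hset]
    have hrow0 : PySem.List.pyGetD mt (t : Int) [] = List.replicate size.toNat (0:Int) := by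
      rw [PySem.List.pyGetD_of_nonneg _ _ (by positivity), hmt]
      rw [List.getD_eq_getElem _ _ (by rw [← hmt, hlenmt]; omega)]
      rw [List.getElem_append_right (by omega)]
      simp
    rw [hrow0]
    have hr0len : ((List.replicate size.toNat (0:Int)).length : Int) = ((size.toNat : Nat) : Int) := by simp
    have hfold := pv_rowfold
      (fun j => if (t:Int)+j ≤ 3 ∨ size-1-j+(t:Int) ≤ 3 ∨ size-1-(t:Int)+j ≤ 3 ∨ size-1-(t:Int)+size-1-j ≤ 3 then 0 else 1)
      size.toNat 0 (List.replicate size.toNat (0:Int)) le_rfl (by simp)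
    rw [hr0len] at hfold
    rw [hfold]
    have hsz : ((size.toNat : Nat) : Int) = size := by omega
    have hrowA : (List.replicate size.toNat (0:Int)).take (0:Int).toNat
        ++ (PySem.List.pyRange 0 ((size.toNat : Nat) : Int) 1).map
          (fun j => if (t:Int)+j ≤ 3 ∨ size-1-j+(t:Int) ≤ 3 ∨ size-1-(t:Int)+j ≤ 3 ∨ size-1-(t:Int)+size-1-j ≤ 3 then 0 else 1)
        = pvRowA size (t : Int) := by
      rw [hsz]; simp [pvRowA]
    rw [hrowA]
    -- now: pySetD mt t (pvRowA size t) = map ++ [row] ++ replicate (n - (t+1))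
    rw [PySem.List.pySetD_of_nonneg _ _ (by positivity), hmt]
    have hrep : List.replicate (size.toNat - t) (List.replicate size.toNat (0:Int))
        = List.replicate size.toNat (0:Int) :: List.replicate (size.toNat - (t+1)) (List.replicate size.toNat (0:Int)) := by
      have : size.toNat - t = (size.toNat - (t+1)) + 1 := by omega
      rw [this, List.replicate_succ]
    rw [hrep, List.set_append_right _ _ (by rw [hlenmap]; omega)]
    have hidx : ((t:Int)).toNat - ((PySem.List.pyRange 0 (t : Int) 1).map (pvRowA size)).length = 0 := by
      rw [hlenmap]; omega
    rw [hidx]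
    simp

lemma pv_circle_eq_map (size : Int) :
    circle size = (PySem.List.pyRange 0 size 1).map (pvRowA size) := by
  simp only [circle]
  by_cases hpos : 0 < size
  · have hmat : (PySem.List.pyRange 0 size 1).map (fun _ => PySem.List.pyRepeat [(0:Int)] size)
        = List.replicate size.toNat (List.replicate size.toNat (0:Int)) := by
      simp [List.map_const', PySem.List.length_pyRange_one, PySem.List.pyRepeat_singleton]
    rw [hmat]
    have hsz : ((size.toNat : Nat) : Int) = size := by omega
    have key := pv_outer size hpos size.toNat le_rfl
    rw [hsz] at key
    simp only [List.length_replicate, hsz]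
    simpa using key
  · have h0 : PySem.List.pyRange 0 size 1 = [] := PySem.List.pyRange_one_eq_nil (by omega)
    simp [h0]

lemma pv_alt_eq_map (size : Int) :
    circle_alt size = (PySem.List.pyRange 0 size 1).map (pvRowB size) := by
  unfold circle_alt
  rw [PySem.List.foldl_append_singleton_eq_map]
  simp [pvRowB]

lemma pv_row_eq (size i : Int) (h0 : 0 ≤ i) (hs : i < size) :
    pvRowA size i = pvRowB size i := by
  unfold pvRowA pvRowB
  simp only [PySem.List.pyRepeat_singleton]
  apply List.ext_getElem
  · simp [PySem.List.length_pyRange_one]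
    split_ifs <;> simp <;> omega
  · intro jn h1 h2
    simp only [List.getElem_map, PySem.List.getElem_pyRange_one]
    have hjn : jn < size.toNat := by
      simpa [PySem.List.length_pyRange_one] using h1
    have hj : (0:Int) + (jn:Int) = (jn:Int) := by ring
    rw [hj]
    by_cases hones : size - 2 * max 0 (4 - min i (size - 1 - i)) > 0
    · simp only [if_pos hones]
      simp only [List.getElem_append, List.length_append, List.length_replicate,
        List.getElem_replicate]
      split_ifs <;> omega
    · simp only [if_neg hones]
      simp only [List.getElem_replicate]
      split_ifs <;> omega

-- ===== VERDICT (by name: the statement is the Claim_ definition above) =====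
theorem circle_spec : Claim_equal_circle := by
  intro size _
  unfold Spec_circle
  rw [pv_circle_eq_map, pv_alt_eq_map]
  exact List.map_congr_left (fun i hi => by
    rw [PySem.List.mem_pyRange_one] at hi
    exact pv_row_eq size i hi.1 hi.2)
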